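-- pv_equiv track=rewrite | github.com/pypi-data/pypi-mirror-200 | packages/qrem/qrem-0.1.1.tar.gz/qrem-0.1.1/src/qrem/local_tests/mitigation_tests.py | divide_dictionary
-- ===== SOURCE A (Python) =====
-- def divide_dictionary(dictionary, items_number, start_index=0):
--     counter=0
--     divided_dictionary_1 ={}
--     divided_dictionary_2={}
--     for key,entry in  dictionary.items():
--         if counter<start_index+items_number-1:
--             divided_dictionary_1[key] = entry
--         else:
--             divided_dictionary_2[key]=entry
--         counter=counter+1
--     return divided_dictionary_1, divided_dictionary_2
-- ===== SOURCE B (Python) =====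
-- def divide_dictionary(dictionary, items_number, start_index=0):
--     first = {}
--     rest = dict(dictionary)
--     moves = start_index + items_number - 1
--     while moves > 0 and rest:
--         key = next(iter(rest))
--         first[key] = rest.pop(key)
--         moves -= 1
--     return first, rest
-- ===== Notes on version B (the rewrite author's own statement) =====
-- stated objective: alternative
-- what changed: B replaces A's forward per-element counter-vs-threshold routing into two fresh dicts by a destructive transfer: it copies the whole dict into the second result and then pops keys one at a time from its front into the first result while a countdown from start_index+items_number-1 stays positive.
import Mathlib
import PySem

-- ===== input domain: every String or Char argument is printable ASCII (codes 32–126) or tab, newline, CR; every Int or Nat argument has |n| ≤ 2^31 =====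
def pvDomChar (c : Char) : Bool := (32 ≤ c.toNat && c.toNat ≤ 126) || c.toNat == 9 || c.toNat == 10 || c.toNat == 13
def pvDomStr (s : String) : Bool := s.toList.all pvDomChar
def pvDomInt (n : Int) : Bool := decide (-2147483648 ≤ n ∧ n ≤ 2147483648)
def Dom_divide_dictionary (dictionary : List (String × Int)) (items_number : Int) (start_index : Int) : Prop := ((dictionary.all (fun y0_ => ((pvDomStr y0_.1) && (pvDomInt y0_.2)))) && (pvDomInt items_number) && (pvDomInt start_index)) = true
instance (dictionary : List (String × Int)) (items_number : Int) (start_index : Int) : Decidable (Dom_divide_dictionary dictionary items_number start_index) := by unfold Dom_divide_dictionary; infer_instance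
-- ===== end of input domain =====

-- B copies the whole dict into the second result and destructively moves keys from its front
-- into the first result while a countdown from start_index+items_number-1 stays positive,
-- instead of A's forward counter-vs-threshold routing into two fresh dicts; objective: alternative.


-- ===== PORT A =====
-- counter loop: each item goes to dict 1 while counter < start_index+items_number-1, else to dict 2
def divide_dictionary (dictionary : List (String × Int)) (items_number : Int) (start_index : Int) : (List (String × Int)) × (List (String × Int)) :=
  let st := dictionary.foldl
    (fun (st : Int × PySem.Dict String Int × PySem.Dict String Int) kv =>
      let (counter, d1, d2) := st
      if counter < start_index + items_number - 1 then
        (counter + 1, d1.insert kv.1 kv.2, d2)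
      else
        (counter + 1, d1, d2.insert kv.1 kv.2))
    (0, PySem.Dict.empty, PySem.Dict.empty)
  (st.2.1.items, st.2.2.items)

-- ===== PORT B =====
-- B's while loop: 'while moves > 0 and rest: key = next(iter(rest)); first[key] = rest.pop(key); moves -= 1'
def pvTransfer (first : PySem.Dict String Int) (rest : PySem.Dict String Int) (moves : Int) : (PySem.Dict String Int) × (PySem.Dict String Int) :=
  if 0 < moves then
    match h : rest.items with
    | [] => (first, rest)
    | (k, v) :: _ => pvTransfer (first.insert k v) (rest.erase k) (moves - 1)
  else (first, rest)
termination_by rest.items.length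
decreasing_by
  simp only [PySem.Dict.erase, h, List.filter_cons, beq_self_eq_true, Bool.not_true]
  exact Nat.lt_succ_of_le (List.length_filter_le _ _)

def divide_dictionary_alt (dictionary : List (String × Int)) (items_number : Int) (start_index : Int) : (List (String × Int)) × (List (String × Int)) :=
  let p := pvTransfer PySem.Dict.empty (PySem.Dict.ofList dictionary) (start_index + items_number - 1)
  (p.1.items, p.2.items)

-- ===== PRECONDITION & SPEC =====
-- Pre_ excludes association lists with duplicate keys: the Python argument is a dict, whose keys
-- are necessarily distinct, so a duplicate-keyed list does not represent any actual input of A.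
def Pre_divide_dictionary (dictionary : List (String × Int)) (items_number : Int) (start_index : Int) : Prop :=
  (dictionary.map Prod.fst).Nodup
instance (dictionary : List (String × Int)) (items_number : Int) (start_index : Int) : Decidable (Pre_divide_dictionary dictionary items_number start_index) := by unfold Pre_divide_dictionary; infer_instance

def pvWitness_divide_dictionary : (List (String × Int)) × Int × Int := ([("a", 1), ("b", 2), ("c", 3)], 2, 0)

def Spec_divide_dictionary (dictionary : List (String × Int)) (items_number : Int) (start_index : Int) (out : (List (String × Int)) × (List (String × Int))) : Prop := out = divide_dictionary_alt dictionary items_number start_index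
instance (dictionary : List (String × Int)) (items_number : Int) (start_index : Int) (out : (List (String × Int)) × (List (String × Int))) : Decidable (Spec_divide_dictionary dictionary items_number start_index out) := by unfold Spec_divide_dictionary; infer_instance

-- ===== CLAIM (what is proved, stated in full; the proofs are below) =====
def Claim_equal_divide_dictionary : Prop := ∀ (dictionary : List (String × Int)) (items_number : Int) (start_index : Int), Dom_divide_dictionary dictionary items_number start_index → Pre_divide_dictionary dictionary items_number start_index → Spec_divide_dictionary dictionary items_number start_index (divide_dictionary dictionary items_number start_index)

-- ===== LEMMAS AND PROOFS =====

-- ofList on a duplicate-free association list keeps it as is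
theorem pv_ofList_items_of_nodup (l : List (String × Int)) (h : (l.map Prod.fst).Nodup) :
    (PySem.Dict.ofList l).items = l := by
  have := PySem.Dict.items_foldl_insert_fresh l Prod.fst Prod.snd PySem.Dict.empty (by simp) h
  simpa [PySem.Dict.ofList, PySem.Dict.update] using this

-- loop invariant for A's fold: starting from counter c and fresh duplicate-free keys,
-- the first (t-c)⁺ remaining items go to d1 and the rest to d2, appended in order
theorem pv_loopA (t : Int) (xs : List (String × Int)) : ∀ (c : Int) (d1 d2 : PySem.Dict String Int),
    (xs.map Prod.fst).Nodup →
    (∀ p ∈ xs, d1.contains p.1 = false) →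
    (∀ p ∈ xs, d2.contains p.1 = false) →
    xs.foldl
      (fun (st : Int × PySem.Dict String Int × PySem.Dict String Int) kv =>
        let (counter, d1, d2) := st
        if counter < t then (counter + 1, d1.insert kv.1 kv.2, d2)
        else (counter + 1, d1, d2.insert kv.1 kv.2))
      (c, d1, d2)
    = (c + xs.length, PySem.Dict.mk (d1.items ++ xs.take (t - c).toNat),
       PySem.Dict.mk (d2.items ++ xs.drop (t - c).toNat)) := by
  induction xs with
  | nil =>
    intro c d1 d2 _ _ _
    simp
  | cons p rest ih =>
    intro c d1 d2 hnd h1 h2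
    obtain ⟨k, v⟩ := p
    have hk1 : d1.contains k = false := h1 (k, v) (by simp)
    have hk2 : d2.contains k = false := h2 (k, v) (by simp)
    have hndrest : (rest.map Prod.fst).Nodup := (List.nodup_cons.mp hnd).2
    have hknot : k ∉ rest.map Prod.fst := by
      simpa using (List.nodup_cons.mp hnd).1
    simp only [List.foldl_cons]
    by_cases hc : c < t
    · rw [if_pos hc]
      rw [ih (c + 1) (d1.insert k v) d2 hndrest
        (by
          intro q hq
          rw [PySem.Dict.contains_insert]
          have : q.1 ≠ k := by
            intro he; exact hknot (he ▸ List.mem_map_of_mem hq)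
          simp [this, h1 q (List.mem_cons_of_mem _ hq)])
        (fun q hq => h2 q (List.mem_cons_of_mem _ hq))]
      have hins : (d1.insert k v).items = d1.items ++ [(k, v)] :=
        PySem.Dict.items_insert_of_not_contains d1 v hk1
      have htake : (t - c).toNat = (t - (c + 1)).toNat + 1 := by omega
      refine Prod.ext (by simp; omega) (Prod.ext ?_ ?_)
      · apply PySem.Dict.ext
        simp [hins, htake, List.take_succ_cons, List.append_assoc]
      · apply PySem.Dict.ext
        simp [htake, List.drop_succ_cons]
    · rw [if_neg hc]
      rw [ih (c + 1) d1 (d2.insert k v) hndrest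
        (fun q hq => h1 q (List.mem_cons_of_mem _ hq))
        (by
          intro q hq
          rw [PySem.Dict.contains_insert]
          have : q.1 ≠ k := by
            intro he; exact hknot (he ▸ List.mem_map_of_mem hq)
          simp [this, h2 q (List.mem_cons_of_mem _ hq)])]
      have hins : (d2.insert k v).items = d2.items ++ [(k, v)] :=
        PySem.Dict.items_insert_of_not_contains d2 v hk2
      have hz : (t - c).toNat = 0 := by omega
      have hz' : (t - (c + 1)).toNat = 0 := by omega
      refine Prod.ext (by simp; omega) (Prod.ext ?_ ?_)
      · apply PySem.Dict.ext
        simp [hz, hz']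
      · apply PySem.Dict.ext
        simp [hins, hz, hz', List.append_assoc]

-- loop invariant for B's transfer: over a duplicate-free rest whose keys are fresh for first,
-- the first m kept items move (in order) to the end of first and the remainder stays
theorem pv_loopB (l : List (String × Int)) : ∀ (first : PySem.Dict String Int) (m : Int),
    (l.map Prod.fst).Nodup →
    (∀ p ∈ l, first.contains p.1 = false) →
    pvTransfer first (PySem.Dict.mk l) m
      = (PySem.Dict.mk (first.items ++ l.take m.toNat), PySem.Dict.mk (l.drop m.toNat)) := by
  induction l with
  | nil =>
    intro first m _ _
    rw [pvTransfer]
    split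
    · simp
    · simp
  | cons p t ih =>
    intro first m hnd hf
    obtain ⟨k, v⟩ := p
    have hkf : first.contains k = false := hf (k, v) (by simp)
    have hndt : (t.map Prod.fst).Nodup := (List.nodup_cons.mp hnd).2
    have hknot : k ∉ t.map Prod.fst := by simpa using (List.nodup_cons.mp hnd).1
    rw [pvTransfer]
    by_cases hm : 0 < m
    · rw [if_pos hm]
      have herase : (PySem.Dict.mk ((k, v) :: t)).erase k = PySem.Dict.mk t := by
        apply PySem.Dict.ext
        simp only [PySem.Dict.erase, List.filter_cons, beq_self_eq_true, Bool.not_true]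
        simp only [if_neg (by simp : ¬ (false = true))]
        exact List.filter_eq_self.mpr (by
          intro q hq
          have : q.1 ≠ k := by intro he; exact hknot (he ▸ List.mem_map_of_mem hq)
          simp [this])
      simp only [herase]
      rw [ih (first.insert k v) (m - 1) hndt
        (by
          intro q hq
          rw [PySem.Dict.contains_insert]
          have : q.1 ≠ k := by intro he; exact hknot (he ▸ List.mem_map_of_mem hq)
          simp [this, hf q (List.mem_cons_of_mem _ hq)])]
      have hins : (first.insert k v).items = first.items ++ [(k, v)] :=
        PySem.Dict.items_insert_of_not_contains first v hkf
      have htake : m.toNat = (m - 1).toNat + 1 := by omega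
      refine Prod.ext ?_ ?_
      · apply PySem.Dict.ext
        rw [htake]
        simp only [hins, List.take_succ_cons, List.append_assoc, List.singleton_append]
      · apply PySem.Dict.ext
        rw [htake]
        simp only [List.drop_succ_cons]
    · rw [if_neg hm]
      have hz : m.toNat = 0 := by omega
      refine Prod.ext ?_ ?_
      · apply PySem.Dict.ext; simp [hz]
      · apply PySem.Dict.ext; simp [hz]

-- ===== VERDICT (by name: the statement is the Claim_ definition above) =====
theorem divide_dictionary_spec : Claim_equal_divide_dictionary := by
  intro dictionary items_number start_index _ hpre
  unfold Spec_divide_dictionary divide_dictionary divide_dictionary_alt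
  have hA := pv_loopA (start_index + items_number - 1) dictionary 0 PySem.Dict.empty PySem.Dict.empty
    hpre (by simp [PySem.Dict.contains_empty]) (by simp [PySem.Dict.contains_empty])
  have hofl : PySem.Dict.ofList dictionary = PySem.Dict.mk dictionary := by
    apply PySem.Dict.ext
    exact pv_ofList_items_of_nodup dictionary hpre
  have hB := pv_loopB dictionary PySem.Dict.empty (start_index + items_number - 1)
    hpre (by simp [PySem.Dict.contains_empty])
  have hn : (start_index + items_number - 1 - 0).toNat = (start_index + items_number - 1).toNat := by
    omega
  rw [hn] at hA
  simp only [hA, hofl, hB]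
  simp [PySem.Dict.empty]
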